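-- pv_equiv track=rewrite | github.com/Starztest/Starzai-discord | utils/music_api.py | _pick_best_url
-- ===== SOURCE A (Python) =====
-- from typing import Any, Dict, List, Optional
--
-- QUALITY_TIERS: List[str] = ["12kbps", "48kbps", "96kbps", "160kbps", "320kbps"]
--
-- def _pick_best_url(download_urls: List[Dict[str, str]], preferred: str = "320kbps") -> str:
--     """Pick the best available download URL by quality preference."""
--     if not download_urls:
--         return ""
--
--     # Preference cascade
--     preference_order = [preferred]
--     # Build fallback chain
--     if preferred in QUALITY_TIERS:
--         idx = QUALITY_TIERS.index(preferred)
--         # Add lower qualities as fallback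
--         for i in range(idx - 1, -1, -1):
--             preference_order.append(QUALITY_TIERS[i])
--
--     url_map = {d["quality"]: d["url"] for d in download_urls}
--
--     for q in preference_order:
--         if q in url_map:
--             return url_map[q]
--
--     # Absolute fallback: highest available
--     for q in reversed(QUALITY_TIERS):
--         if q in url_map:
--             return url_map[q]
--
--     # Last resort: last entry
--     return download_urls[-1]["url"] if download_urls else ""
-- ===== SOURCE B (Python) =====
-- from typing import Dict, List
--
-- QUALITY_TIERS: List[str] = ["12kbps", "48kbps", "96kbps", "160kbps", "320kbps"]
--
-- def _pick_best_url(download_urls: List[Dict[str, str]], preferred: str = "320kbps") -> str: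
--     """Pick the best available download URL by quality preference (rank-table single pass)."""
--     if not download_urls:
--         return ""
--     n = len(QUALITY_TIERS)
--     # Priority table: preferred -> 0, then strictly lower tiers descending, then higher tiers descending.
--     rank = {}
--     if preferred in QUALITY_TIERS:
--         idx = QUALITY_TIERS.index(preferred)
--         for t, q in enumerate(QUALITY_TIERS):
--             rank[q] = idx - t if t <= idx else idx + 1 + (n - 1 - t)
--     else:
--         rank[preferred] = 0
--         for t, q in enumerate(QUALITY_TIERS):
--             rank[q] = 1 + (n - 1 - t)
--     best = None  # (rank, url); <= keeps the LAST entry of the winning quality (dict last-wins)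
--     for d in download_urls:
--         q = d["quality"]
--         u = d["url"]
--         r = rank.get(q)
--         if r is not None and (best is None or r <= best[0]):
--             best = (r, u)
--     if best is not None:
--         return best[1]
--     return download_urls[-1]["url"]
-- ===== Notes on version B (the rewrite author's own statement) =====
-- stated objective: alternative
-- what changed: Replaces the build-a-dict-then-cascade-through-preference-lists search with a precomputed quality->priority rank table and a single min-rank scan over download_urls (using <= so the last duplicate wins), with the same last-entry fallback; Pre_ only excludes entries missing the 'quality' or 'url' key, where both raise KeyError.
import Mathlib
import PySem

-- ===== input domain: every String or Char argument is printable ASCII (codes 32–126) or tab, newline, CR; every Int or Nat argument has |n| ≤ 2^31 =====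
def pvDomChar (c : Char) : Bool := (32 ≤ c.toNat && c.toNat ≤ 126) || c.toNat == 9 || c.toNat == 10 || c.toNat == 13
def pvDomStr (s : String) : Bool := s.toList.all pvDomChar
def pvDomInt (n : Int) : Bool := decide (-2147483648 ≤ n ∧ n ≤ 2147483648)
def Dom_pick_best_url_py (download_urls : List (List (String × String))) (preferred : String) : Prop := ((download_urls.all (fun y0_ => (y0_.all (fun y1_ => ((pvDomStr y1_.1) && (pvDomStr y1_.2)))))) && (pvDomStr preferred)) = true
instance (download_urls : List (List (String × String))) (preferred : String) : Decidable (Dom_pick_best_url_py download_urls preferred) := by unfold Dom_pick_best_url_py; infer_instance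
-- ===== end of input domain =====

-- B replaces A's dict-then-preference-cascade with a rank table and one min-rank scan; return values proved equal on Pre_ (entries carrying both "quality" and "url" keys — elsewhere the Python raises KeyError).

-- ===== PORT A =====
def pvTiers : List String := ["12kbps", "48kbps", "96kbps", "160kbps", "320kbps"]

-- 'for q in qs: if q in url_map: return url_map[q]' — first quality present in the map
def pvFirstHit : List String → PySem.Dict String String → Option String
  | [], _ => none
  | q :: qs, m =>
    match m.get? q with
    | some u => some u
    | none => pvFirstHit qs m

def pick_best_url_py (download_urls : List (List (String × String))) (preferred : String) : String :=
  if download_urls = [] then ""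
  else
    let preference_order : List String :=
      match PySem.List.index? pvTiers preferred with
      | some idx =>
          (PySem.List.pyRange ((idx : Int) - 1) (-1) (-1)).foldl
            (fun acc i => acc ++ [(PySem.List.pyGet? pvTiers i).getD ""]) [preferred]
      | none => [preferred]
    let url_map : PySem.Dict String String :=
      download_urls.foldl
        (fun m d =>
          m.insert (((PySem.Dict.mk d).get? "quality").getD "")
                   (((PySem.Dict.mk d).get? "url").getD "")) PySem.Dict.empty
    match pvFirstHit preference_order url_map with
    | some u => u
    | none =>
      match pvFirstHit pvTiers.reverse url_map with
      | some u => u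
      | none => ((PySem.Dict.mk ((PySem.List.pyGet? download_urls (-1)).getD [])).get? "url").getD ""

-- ===== PORT B =====
-- rank[q] built from the cascade order: preferred = 0, lower tiers descending, then higher tiers descending
def pvRankTable (preferred : String) : PySem.Dict String Int :=
  match PySem.List.index? pvTiers preferred with
  | some idx =>
      (PySem.List.enumerate pvTiers).foldl
        (fun r tq => r.insert tq.2 (if tq.1 ≤ (idx : Int) then (idx : Int) - tq.1 else (idx : Int) + 1 + (5 - 1 - tq.1)))
        PySem.Dict.empty
  | none =>
      (PySem.List.enumerate pvTiers).foldl
        (fun r tq => r.insert tq.2 (1 + (5 - 1 - tq.1)))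
        (PySem.Dict.empty.insert preferred 0)

-- single pass keeping (rank, url) of the best entry; '≤' makes the LAST entry of the winning quality stick
def pvScan (rank : PySem.Dict String Int) :
    List (List (String × String)) → Option (Int × String) → Option (Int × String)
  | [], best => best
  | d :: ds, best =>
    let q := ((PySem.Dict.mk d).get? "quality").getD ""
    let u := ((PySem.Dict.mk d).get? "url").getD ""
    match rank.get? q with
    | none => pvScan rank ds best
    | some r =>
      match best with
      | none => pvScan rank ds (some (r, u))
      | some b => if r ≤ b.1 then pvScan rank ds (some (r, u)) else pvScan rank ds best

def pick_best_url_py_alt (download_urls : List (List (String × String))) (preferred : String) : String :=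
  if download_urls = [] then ""
  else
    match pvScan (pvRankTable preferred) download_urls none with
    | some b => b.2
    | none => ((PySem.Dict.mk ((PySem.List.pyGet? download_urls (-1)).getD [])).get? "url").getD ""

-- ===== PRECONDITION & SPEC =====
-- Pre_ excludes exactly the inputs on which the Python raises KeyError: an entry without a "quality" or "url" key.
def Pre_pick_best_url_py (download_urls : List (List (String × String))) (preferred : String) : Prop :=
  ∀ d ∈ download_urls, ((PySem.Dict.mk d).get? "quality").isSome ∧ ((PySem.Dict.mk d).get? "url").isSome
instance (download_urls : List (List (String × String))) (preferred : String) : Decidable (Pre_pick_best_url_py download_urls preferred) := by unfold Pre_pick_best_url_py; infer_instance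

def pvWitness_pick_best_url_py : (List (List (String × String))) × String :=
  ([[("quality", "96kbps"), ("url", "http://a")], [("quality", "320kbps"), ("url", "http://b")]], "160kbps")

def Spec_pick_best_url_py (download_urls : List (List (String × String))) (preferred : String) (out : String) : Prop := out = pick_best_url_py_alt download_urls preferred
instance (download_urls : List (List (String × String))) (preferred : String) (out : String) : Decidable (Spec_pick_best_url_py download_urls preferred out) := by unfold Spec_pick_best_url_py; infer_instance

-- ===== CLAIM (what is proved, stated in full; the proofs are below) =====
def Claim_equal_pick_best_url_py : Prop := ∀ (download_urls : List (List (String × String))) (preferred : String), Dom_pick_best_url_py download_urls preferred → Pre_pick_best_url_py download_urls preferred → Spec_pick_best_url_py download_urls preferred (pick_best_url_py download_urls preferred)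

-- ===== LEMMAS AND PROOFS =====

lemma pvFirstHit_append (xs ys : List String) (m : PySem.Dict String String) :
    pvFirstHit (xs ++ ys) m =
      match pvFirstHit xs m with
      | some u => some u
      | none => pvFirstHit ys m := by
  induction xs with
  | nil => rfl
  | cons q qs ih =>
    simp only [List.cons_append, pvFirstHit]
    cases m.get? q <;> simp [ih]

lemma pvFirstHit_eq_none_iff (xs : List String) (m : PySem.Dict String String) :
    pvFirstHit xs m = none ↔ ∀ q ∈ xs, m.get? q = none := by
  induction xs with
  | nil => simp [pvFirstHit]
  | cons q qs ih =>
    simp only [pvFirstHit]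
    cases h : m.get? q <;> simp_all

-- appended qualities already tried earlier are dead checks
lemma pvFirstHit_append_subset (xs ys : List String) (m : PySem.Dict String String)
    (h : ∀ q ∈ ys, q ∈ xs) :
    pvFirstHit (xs ++ ys) m = pvFirstHit xs m := by
  rw [pvFirstHit_append]
  cases hx : pvFirstHit xs m with
  | some u => rfl
  | none =>
    rw [(pvFirstHit_eq_none_iff ys m).2 (fun q hq => (pvFirstHit_eq_none_iff xs m).1 hx q (h q hq))]

-- invariant tying B's scan state to the map A builds: the state is the first hit of ks in the map
def pvInv (ks : List String) (best : Option (Int × String)) (m : PySem.Dict String String) : Prop :=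
  match best with
  | none => ∀ q ∈ ks, m.get? q = none
  | some (r, u) => 0 ≤ r ∧ r.toNat < ks.length ∧
      m.get? (ks.getD r.toNat "") = some u ∧ ∀ j < r.toNat, m.get? (ks.getD j "") = none

lemma pvFirstHit_hit (ks : List String) (m : PySem.Dict String String) (u : String) (t : Nat)
    (hlt : t < ks.length) (hget : m.get? (ks.getD t "") = some u)
    (hb : ∀ j < t, m.get? (ks.getD j "") = none) :
    pvFirstHit ks m = some u := by
  induction ks generalizing t with
  | nil => simp at hlt
  | cons q qs ih =>
    simp only [pvFirstHit]
    cases t with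
    | zero =>
      simp only [List.getD_cons_zero] at hget
      rw [hget]
    | succ t =>
      have h0 : m.get? q = none := by simpa using hb 0 (Nat.succ_pos t)
      rw [h0]
      exact ih t (by simpa using hlt) (by simpa using hget)
        (fun j hj => by simpa using hb (j + 1) (by omega))

lemma pvFirstHit_of_inv (ks : List String) (best : Option (Int × String))
    (m : PySem.Dict String String) (h : pvInv ks best m) :
    pvFirstHit ks m = best.map (·.2) := by
  cases best with
  | none =>
    simp only [Option.map_none]
    exact (pvFirstHit_eq_none_iff ks m).2 h
  | some b =>
    obtain ⟨r, u⟩ := b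
    obtain ⟨hr0, hlt, hget, hbefore⟩ := h
    simp only [Option.map_some]
    exact pvFirstHit_hit ks m u r.toNat hlt hget hbefore

-- the state-update B performs on one entry (used to phrase the step lemma without dependent matches)
def pvStep (rank : PySem.Dict String Int) (best : Option (Int × String)) (q u : String) :
    Option (Int × String) :=
  match rank.get? q with
  | none => best
  | some r =>
    match best with
    | none => some (r, u)
    | some b => if r ≤ b.1 then some (r, u) else best

lemma pvScan_cons (rank : PySem.Dict String Int) (d : List (String × String))
    (ds : List (List (String × String))) (best : Option (Int × String)) :
    pvScan rank (d :: ds) best =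
      pvScan rank ds (pvStep rank best
        (((PySem.Dict.mk d).get? "quality").getD "") (((PySem.Dict.mk d).get? "url").getD "")) := by
  simp only [pvScan, pvStep]
  cases rank.get? (((PySem.Dict.mk d).get? "quality").getD "") with
  | none => rfl
  | some r =>
    cases best with
    | none => rfl
    | some b => by_cases h : r ≤ b.1 <;> simp [h]

lemma pvStep_none (rank : PySem.Dict String Int) (best : Option (Int × String)) (q u : String)
    (h : rank.get? q = none) : pvStep rank best q u = best := by
  unfold pvStep; rw [h]

lemma pvStep_some_none (rank : PySem.Dict String Int) (q u : String) (r : Int)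
    (h : rank.get? q = some r) : pvStep rank none q u = some (r, u) := by
  unfold pvStep; rw [h]

lemma pvStep_some_some (rank : PySem.Dict String Int) (q u : String) (r : Int) (b : Int × String)
    (h : rank.get? q = some r) :
    pvStep rank (some b) q u = if r ≤ b.1 then some (r, u) else some b := by
  unfold pvStep; rw [h]

-- one step of B's scan preserves the invariant against one insert into A's map
lemma pvInv_step (ks : List String) (hnd : ks.Nodup) (rank : PySem.Dict String Int)
    (hrank : ∀ q, rank.get? q = Option.map (fun n : Nat => (n : Int)) (PySem.List.index? ks q))
    (best : Option (Int × String)) (m : PySem.Dict String String) (q u : String)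
    (hinv : pvInv ks best m) :
    pvInv ks (pvStep rank best q u) (m.insert q u) := by
  have hget := hrank q
  cases hidx : PySem.List.index? ks q with
  | none =>
    rw [hidx] at hget
    simp only [Option.map_none] at hget
    rw [pvStep_none rank best q u hget]
    have hqnot : q ∉ ks := (PySem.List.index?_eq_none_iff ks q).1 hidx
    cases best with
    | none =>
      intro q' hq'
      rw [PySem.Dict.get?_insert_of_ne _ _ (fun h => hqnot (by rw [← h]; exact hq'))]
      exact hinv q' hq'
    | some b =>
      obtain ⟨r, u'⟩ := b
      obtain ⟨hr0, hlt, hg, hb⟩ := hinv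
      refine ⟨hr0, hlt, ?_, ?_⟩
      · rw [PySem.Dict.get?_insert_of_ne _ _ (fun h => hqnot (by
          rw [← h, List.getD_eq_getElem ks "" hlt]; exact List.getElem_mem hlt))]
        exact hg
      · intro j hj
        have hjlen : j < ks.length := by omega
        rw [PySem.Dict.get?_insert_of_ne _ _ (fun h => hqnot (by
          rw [← h, List.getD_eq_getElem ks "" hjlen]; exact List.getElem_mem hjlen))]
        exact hb j hj
  | some k =>
    rw [hidx] at hget
    simp only [Option.map_some] at hget
    obtain ⟨hk, hkq, hkmin⟩ := PySem.List.getElem_of_index?_eq_some hidx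
    have htk : ((k : Int)).toNat = k := by omega
    have hne : ∀ j, j < ks.length → j ≠ k → ks.getD j "" ≠ q := by
      intro j hj hjk heq
      rw [List.getD_eq_getElem ks "" hj] at heq
      exact hjk ((List.Nodup.getElem_inj_iff hnd).1 (heq.trans hkq.symm))
    have hgk : ks.getD k "" = q := by rw [List.getD_eq_getElem ks "" hk]; exact hkq
    cases best with
    | none =>
      rw [pvStep_some_none rank q u _ hget]
      refine ⟨by omega, by rw [htk]; exact hk, ?_, ?_⟩
      · rw [htk, hgk, PySem.Dict.get?_insert_self]
      · intro j hj
        rw [htk] at hj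
        have hjlen : j < ks.length := by omega
        rw [PySem.Dict.get?_insert_of_ne _ _ (hne j hjlen (by omega))]
        exact hinv _ (by rw [List.getD_eq_getElem ks "" hjlen]; exact List.getElem_mem hjlen)
    | some b =>
      rw [pvStep_some_some rank q u _ b hget]
      obtain ⟨r0, u0⟩ := b
      obtain ⟨hr0, hlt, hg, hb⟩ := hinv
      by_cases hle : (k : Int) ≤ r0
      · rw [if_pos hle]
        refine ⟨by omega, by rw [htk]; exact hk, ?_, ?_⟩
        · rw [htk, hgk, PySem.Dict.get?_insert_self]
        · intro j hj
          rw [htk] at hj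
          rw [PySem.Dict.get?_insert_of_ne _ _ (hne j (by omega) (by omega))]
          exact hb j (by omega)
      · rw [if_neg hle]
        have hkgt : r0.toNat < k := by omega
        refine ⟨hr0, hlt, ?_, ?_⟩
        · rw [PySem.Dict.get?_insert_of_ne _ _ (hne r0.toNat (by omega) (by omega))]
          exact hg
        · intro j hj
          rw [PySem.Dict.get?_insert_of_ne _ _ (hne j (by omega) (by omega))]
          exact hb j hj

-- main induction: B's scan result is the first hit of ks in A's map
lemma pvMain (ks : List String) (hnd : ks.Nodup) (rank : PySem.Dict String Int)
    (hrank : ∀ q, rank.get? q = Option.map (fun n : Nat => (n : Int)) (PySem.List.index? ks q))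
    (ds : List (List (String × String))) (best : Option (Int × String)) (m : PySem.Dict String String)
    (hinv : pvInv ks best m) :
    pvFirstHit ks
        (ds.foldl (fun m d =>
          m.insert (((PySem.Dict.mk d).get? "quality").getD "")
                   (((PySem.Dict.mk d).get? "url").getD "")) m)
      = (pvScan rank ds best).map (·.2) := by
  induction ds generalizing best m with
  | nil => simpa [pvScan] using pvFirstHit_of_inv ks best m hinv
  | cons d ds ih =>
    rw [pvScan_cons, List.foldl_cons]
    exact ih _ _ (pvInv_step ks hnd rank hrank best m _ _ hinv)

-- the search list A effectively scans, per case of 'preferred in QUALITY_TIERS'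
def pvKeys (preferred : String) : List String :=
  match PySem.List.index? pvTiers preferred with
  | some 0 => ["12kbps", "320kbps", "160kbps", "96kbps", "48kbps"]
  | some 1 => ["48kbps", "12kbps", "320kbps", "160kbps", "96kbps"]
  | some 2 => ["96kbps", "48kbps", "12kbps", "320kbps", "160kbps"]
  | some 3 => ["160kbps", "96kbps", "48kbps", "12kbps", "320kbps"]
  | some _ => ["320kbps", "160kbps", "96kbps", "48kbps", "12kbps"]
  | none => preferred :: ["320kbps", "160kbps", "96kbps", "48kbps", "12kbps"]

lemma pvKeys_nodup (preferred : String) : (pvKeys preferred).Nodup := by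
  unfold pvKeys
  cases hidx : PySem.List.index? pvTiers preferred with
  | none =>
    have hnot : preferred ∉ pvTiers := (PySem.List.index?_eq_none_iff pvTiers preferred).1 hidx
    refine List.nodup_cons.2 ⟨?_, by decide⟩
    intro hmem
    apply hnot
    simp [pvTiers] at hmem ⊢
    tauto
  | some k =>
    match k with
    | 0 => exact (by decide : List.Nodup ["12kbps", "320kbps", "160kbps", "96kbps", "48kbps"])
    | 1 => exact (by decide : List.Nodup ["48kbps", "12kbps", "320kbps", "160kbps", "96kbps"])
    | 2 => exact (by decide : List.Nodup ["96kbps", "48kbps", "12kbps", "320kbps", "160kbps"])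
    | 3 => exact (by decide : List.Nodup ["160kbps", "96kbps", "48kbps", "12kbps", "320kbps"])
    | 4 => exact (by decide : List.Nodup ["320kbps", "160kbps", "96kbps", "48kbps", "12kbps"])
    | n + 5 =>
      exfalso
      obtain ⟨hk, _, _⟩ := PySem.List.getElem_of_index?_eq_some hidx
      simp [pvTiers] at hk

-- keys not inserted by the fold are looked up in the base dict
lemma pvGet?_foldl_insert_skip {ν : Type} (l : List (Int × String)) (f : Int × String → ν)
    (d0 : PySem.Dict String ν) (q : String) (hq : ∀ p ∈ l, p.2 ≠ q) :
    (l.foldl (fun r tq => r.insert tq.2 (f tq)) d0).get? q = d0.get? q := by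
  induction l generalizing d0 with
  | nil => rfl
  | cons p l ih =>
    rw [List.foldl_cons,
      ih (d0.insert p.2 (f p)) (fun r hr => hq r (List.mem_cons_of_mem _ hr))]
    exact PySem.Dict.get?_insert_of_ne _ _ (fun h => hq p List.mem_cons_self h.symm)

-- a quality equal to no tier name is absent from the enumerate fold's keys
lemma pvNotTier (q : String) (e1 : ¬ q = "12kbps") (e2 : ¬ q = "48kbps") (e3 : ¬ q = "96kbps")
    (e4 : ¬ q = "160kbps") (e5 : ¬ q = "320kbps") :
    ∀ p ∈ PySem.List.enumerate pvTiers, p.2 ≠ q := by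
  have henum : PySem.List.enumerate pvTiers =
      [(0, "12kbps"), (1, "48kbps"), (2, "96kbps"), (3, "160kbps"), (4, "320kbps")] := by decide
  rw [henum]
  intro p hp
  simp at hp
  rcases hp with rfl | rfl | rfl | rfl | rfl
  · exact fun h => e1 h.symm
  · exact fun h => e2 h.symm
  · exact fun h => e3 h.symm
  · exact fun h => e4 h.symm
  · exact fun h => e5 h.symm

lemma pvRank_spec (preferred : String) :
    ∀ q, (pvRankTable preferred).get? q =
      Option.map (fun n : Nat => (n : Int)) (PySem.List.index? (pvKeys preferred) q) := by
  intro q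
  cases hidx : PySem.List.index? pvTiers preferred with
  | none =>
    have hnot : preferred ∉ pvTiers := (PySem.List.index?_eq_none_iff pvTiers preferred).1 hidx
    simp [pvTiers, not_or] at hnot
    obtain ⟨h1, h2, h3, h4, h5⟩ := hnot
    have hkeys : pvKeys preferred =
        preferred :: ["320kbps", "160kbps", "96kbps", "48kbps", "12kbps"] := by
      unfold pvKeys; rw [hidx]
    have htab : pvRankTable preferred =
        (PySem.List.enumerate pvTiers).foldl
          (fun r tq => r.insert tq.2 (1 + (5 - 1 - tq.1)))
          (PySem.Dict.empty.insert preferred 0) := by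
      unfold pvRankTable; rw [hidx]
    rw [hkeys, htab]
    have henum : PySem.List.enumerate pvTiers =
        [(0, "12kbps"), (1, "48kbps"), (2, "96kbps"), (3, "160kbps"), (4, "320kbps")] := by decide
    rw [henum]
    simp only [List.foldl_cons, List.foldl_nil]
    by_cases e1 : q = "12kbps"
    · subst e1
      rw [PySem.List.index?_cons_of_ne _ h1]
      rw [PySem.Dict.get?_insert_of_ne _ _ (by decide)]
      rw [PySem.Dict.get?_insert_of_ne _ _ (by decide)]
      rw [PySem.Dict.get?_insert_of_ne _ _ (by decide)]
      rw [PySem.Dict.get?_insert_of_ne _ _ (by decide)]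
      rw [PySem.Dict.get?_insert_self]
      decide
    by_cases e2 : q = "48kbps"
    · subst e2
      rw [PySem.List.index?_cons_of_ne _ h2]
      rw [PySem.Dict.get?_insert_of_ne _ _ (by decide)]
      rw [PySem.Dict.get?_insert_of_ne _ _ (by decide)]
      rw [PySem.Dict.get?_insert_of_ne _ _ (by decide)]
      rw [PySem.Dict.get?_insert_self]
      decide
    by_cases e3 : q = "96kbps"
    · subst e3
      rw [PySem.List.index?_cons_of_ne _ h3]
      rw [PySem.Dict.get?_insert_of_ne _ _ (by decide)]
      rw [PySem.Dict.get?_insert_of_ne _ _ (by decide)]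
      rw [PySem.Dict.get?_insert_self]
      decide
    by_cases e4 : q = "160kbps"
    · subst e4
      rw [PySem.List.index?_cons_of_ne _ h4]
      rw [PySem.Dict.get?_insert_of_ne _ _ (by decide)]
      rw [PySem.Dict.get?_insert_self]
      decide
    by_cases e5 : q = "320kbps"
    · subst e5
      rw [PySem.List.index?_cons_of_ne _ h5]
      rw [PySem.Dict.get?_insert_self]
      decide
    · rw [PySem.Dict.get?_insert_of_ne _ _ e5]
      rw [PySem.Dict.get?_insert_of_ne _ _ e4]
      rw [PySem.Dict.get?_insert_of_ne _ _ e3]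
      rw [PySem.Dict.get?_insert_of_ne _ _ e2]
      rw [PySem.Dict.get?_insert_of_ne _ _ e1]
      by_cases hp : q = preferred
      · subst hp
        rw [PySem.Dict.get?_insert_self, PySem.List.index?_cons_self]
        rfl
      · rw [PySem.Dict.get?_insert_of_ne _ _ hp]
        rw [(PySem.List.index?_eq_none_iff _ q).2 (by
          simp [not_or]
          exact ⟨hp, e5, e4, e3, e2, e1⟩)]
        rfl
  | some k =>
    obtain ⟨hk, hkq, _⟩ := PySem.List.getElem_of_index?_eq_some hidx
    match k with
    | 0 =>
      have hkeys : pvKeys preferred = ["12kbps", "320kbps", "160kbps", "96kbps", "48kbps"] := by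
        unfold pvKeys; rw [hidx]
      rw [hkeys, show preferred = "12kbps" from hkq.symm]
      by_cases e1 : q = "12kbps"
      · subst e1; decide
      by_cases e2 : q = "48kbps"
      · subst e2; decide
      by_cases e3 : q = "96kbps"
      · subst e3; decide
      by_cases e4 : q = "160kbps"
      · subst e4; decide
      by_cases e5 : q = "320kbps"
      · subst e5; decide
      · have htab : pvRankTable "12kbps" =
            (PySem.List.enumerate pvTiers).foldl
              (fun r tq => r.insert tq.2
                (if tq.1 ≤ ((0 : Nat) : Int) then ((0 : Nat) : Int) - tq.1 else ((0 : Nat) : Int) + 1 + (5 - 1 - tq.1)))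
              PySem.Dict.empty := by
          unfold pvRankTable
          rfl
        rw [htab, pvGet?_foldl_insert_skip _ _ _ q (pvNotTier q e1 e2 e3 e4 e5)]
        rw [(PySem.List.index?_eq_none_iff _ q).2 (by
          simp [not_or]
          refine ⟨?_, ?_, ?_, ?_, ?_⟩ <;> intro h <;> simp_all)]
        rfl
    | 1 =>
      have hkeys : pvKeys preferred = ["48kbps", "12kbps", "320kbps", "160kbps", "96kbps"] := by
        unfold pvKeys; rw [hidx]
      rw [hkeys, show preferred = "48kbps" from hkq.symm]
      by_cases e1 : q = "12kbps"
      · subst e1; decide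
      by_cases e2 : q = "48kbps"
      · subst e2; decide
      by_cases e3 : q = "96kbps"
      · subst e3; decide
      by_cases e4 : q = "160kbps"
      · subst e4; decide
      by_cases e5 : q = "320kbps"
      · subst e5; decide
      · have htab : pvRankTable "48kbps" =
            (PySem.List.enumerate pvTiers).foldl
              (fun r tq => r.insert tq.2
                (if tq.1 ≤ ((1 : Nat) : Int) then ((1 : Nat) : Int) - tq.1 else ((1 : Nat) : Int) + 1 + (5 - 1 - tq.1)))
              PySem.Dict.empty := by
          unfold pvRankTable
          rfl
        rw [htab, pvGet?_foldl_insert_skip _ _ _ q (pvNotTier q e1 e2 e3 e4 e5)]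
        rw [(PySem.List.index?_eq_none_iff _ q).2 (by
          simp [not_or]
          refine ⟨?_, ?_, ?_, ?_, ?_⟩ <;> intro h <;> simp_all)]
        rfl
    | 2 =>
      have hkeys : pvKeys preferred = ["96kbps", "48kbps", "12kbps", "320kbps", "160kbps"] := by
        unfold pvKeys; rw [hidx]
      rw [hkeys, show preferred = "96kbps" from hkq.symm]
      by_cases e1 : q = "12kbps"
      · subst e1; decide
      by_cases e2 : q = "48kbps"
      · subst e2; decide
      by_cases e3 : q = "96kbps"
      · subst e3; decide
      by_cases e4 : q = "160kbps"
      · subst e4; decide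
      by_cases e5 : q = "320kbps"
      · subst e5; decide
      · have htab : pvRankTable "96kbps" =
            (PySem.List.enumerate pvTiers).foldl
              (fun r tq => r.insert tq.2
                (if tq.1 ≤ ((2 : Nat) : Int) then ((2 : Nat) : Int) - tq.1 else ((2 : Nat) : Int) + 1 + (5 - 1 - tq.1)))
              PySem.Dict.empty := by
          unfold pvRankTable
          rfl
        rw [htab, pvGet?_foldl_insert_skip _ _ _ q (pvNotTier q e1 e2 e3 e4 e5)]
        rw [(PySem.List.index?_eq_none_iff _ q).2 (by
          simp [not_or]
          refine ⟨?_, ?_, ?_, ?_, ?_⟩ <;> intro h <;> simp_all)]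
        rfl
    | 3 =>
      have hkeys : pvKeys preferred = ["160kbps", "96kbps", "48kbps", "12kbps", "320kbps"] := by
        unfold pvKeys; rw [hidx]
      rw [hkeys, show preferred = "160kbps" from hkq.symm]
      by_cases e1 : q = "12kbps"
      · subst e1; decide
      by_cases e2 : q = "48kbps"
      · subst e2; decide
      by_cases e3 : q = "96kbps"
      · subst e3; decide
      by_cases e4 : q = "160kbps"
      · subst e4; decide
      by_cases e5 : q = "320kbps"
      · subst e5; decide
      · have htab : pvRankTable "160kbps" =
            (PySem.List.enumerate pvTiers).foldl
              (fun r tq => r.insert tq.2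
                (if tq.1 ≤ ((3 : Nat) : Int) then ((3 : Nat) : Int) - tq.1 else ((3 : Nat) : Int) + 1 + (5 - 1 - tq.1)))
              PySem.Dict.empty := by
          unfold pvRankTable
          rfl
        rw [htab, pvGet?_foldl_insert_skip _ _ _ q (pvNotTier q e1 e2 e3 e4 e5)]
        rw [(PySem.List.index?_eq_none_iff _ q).2 (by
          simp [not_or]
          refine ⟨?_, ?_, ?_, ?_, ?_⟩ <;> intro h <;> simp_all)]
        rfl
    | 4 =>
      have hkeys : pvKeys preferred = ["320kbps", "160kbps", "96kbps", "48kbps", "12kbps"] := by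
        unfold pvKeys; rw [hidx]
      rw [hkeys, show preferred = "320kbps" from hkq.symm]
      by_cases e1 : q = "12kbps"
      · subst e1; decide
      by_cases e2 : q = "48kbps"
      · subst e2; decide
      by_cases e3 : q = "96kbps"
      · subst e3; decide
      by_cases e4 : q = "160kbps"
      · subst e4; decide
      by_cases e5 : q = "320kbps"
      · subst e5; decide
      · have htab : pvRankTable "320kbps" =
            (PySem.List.enumerate pvTiers).foldl
              (fun r tq => r.insert tq.2
                (if tq.1 ≤ ((4 : Nat) : Int) then ((4 : Nat) : Int) - tq.1 else ((4 : Nat) : Int) + 1 + (5 - 1 - tq.1)))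
              PySem.Dict.empty := by
          unfold pvRankTable
          rfl
        rw [htab, pvGet?_foldl_insert_skip _ _ _ q (pvNotTier q e1 e2 e3 e4 e5)]
        rw [(PySem.List.index?_eq_none_iff _ q).2 (by
          simp [not_or]
          refine ⟨?_, ?_, ?_, ?_, ?_⟩ <;> intro h <;> simp_all)]
        rfl
    | n + 5 =>
      exfalso
      simp [pvTiers] at hk

-- A's two-stage cascade over preference_order then reversed tiers IS one pvFirstHit over pvKeys
lemma pvCascade (preferred : String) (m : PySem.Dict String String) :
    (match pvFirstHit
        (match PySem.List.index? pvTiers preferred with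
         | some idx =>
             (PySem.List.pyRange ((idx : Int) - 1) (-1) (-1)).foldl
               (fun acc i => acc ++ [(PySem.List.pyGet? pvTiers i).getD ""]) [preferred]
         | none => [preferred]) m with
     | some u => some u
     | none => pvFirstHit pvTiers.reverse m)
    = pvFirstHit (pvKeys preferred) m := by
  have hsplit : ∀ (xs : List String),
      (match pvFirstHit xs m with
       | some u => some u
       | none => pvFirstHit pvTiers.reverse m) = pvFirstHit (xs ++ pvTiers.reverse) m := by
    intro xs
    rw [pvFirstHit_append]
  rw [hsplit]
  unfold pvKeys
  cases hidx : PySem.List.index? pvTiers preferred with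
  | none => rfl
  | some k =>
    obtain ⟨hk, hkq, _⟩ := PySem.List.getElem_of_index?_eq_some hidx
    match k with
    | 0 =>
      rw [show preferred = "12kbps" from hkq.symm]
      exact pvFirstHit_append_subset ["12kbps", "320kbps", "160kbps", "96kbps", "48kbps"] ["12kbps"] m (by decide)
    | 1 =>
      rw [show preferred = "48kbps" from hkq.symm]
      exact pvFirstHit_append_subset ["48kbps", "12kbps", "320kbps", "160kbps", "96kbps"] ["48kbps", "12kbps"] m (by decide)
    | 2 =>
      rw [show preferred = "96kbps" from hkq.symm]
      exact pvFirstHit_append_subset ["96kbps", "48kbps", "12kbps", "320kbps", "160kbps"] ["96kbps", "48kbps", "12kbps"] m (by decide)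
    | 3 =>
      rw [show preferred = "160kbps" from hkq.symm]
      exact pvFirstHit_append_subset ["160kbps", "96kbps", "48kbps", "12kbps", "320kbps"] ["160kbps", "96kbps", "48kbps", "12kbps"] m (by decide)
    | 4 =>
      rw [show preferred = "320kbps" from hkq.symm]
      exact pvFirstHit_append_subset ["320kbps", "160kbps", "96kbps", "48kbps", "12kbps"] ["320kbps", "160kbps", "96kbps", "48kbps", "12kbps"] m (by decide)
    | n + 5 =>
      exfalso
      simp [pvTiers] at hk

lemma pvInv_empty (ks : List String) : pvInv ks none PySem.Dict.empty := by
  intro q _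
  rfl

-- reassociating A's two nested result-matches into one option-level match
lemma pvNest (a b : Option String) (fb : String) :
    (match a with
     | some u => u
     | none =>
       match b with
       | some u => u
       | none => fb)
    = (match (match a with | some u => some u | none => b) with
       | some u => u
       | none => fb) := by
  cases a <;> rfl

lemma pvFinish (o1 : Option String) (o2 : Option (Int × String)) (fb : String) :
    o1 = o2.map (·.2) →
    (match o1 with | some u => u | none => fb)
    = (match o2 with | some b => b.2 | none => fb) := by
  intro h
  cases o2 <;> simp_all

-- ===== VERDICT (by name: the statement is the Claim_ definition above) =====
theorem pick_best_url_py_spec : Claim_equal_pick_best_url_py := by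
  intro download_urls preferred _ _
  unfold Spec_pick_best_url_py pick_best_url_py pick_best_url_py_alt
  by_cases hnil : download_urls = []
  · simp [hnil]
  · rw [if_neg hnil, if_neg hnil]
    have hcombo :=
      (pvCascade preferred
        (download_urls.foldl
          (fun m d =>
            m.insert (((PySem.Dict.mk d).get? "quality").getD "")
                     (((PySem.Dict.mk d).get? "url").getD "")) PySem.Dict.empty)).trans
        (pvMain (pvKeys preferred) (pvKeys_nodup preferred) (pvRankTable preferred)
          (pvRank_spec preferred) download_urls none PySem.Dict.empty (pvInv_empty _))
    exact (pvNest _ _ _).trans (pvFinish _ _ _ hcombo)
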